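-- pv_equiv track=rewrite | github.com/raghav-vaaan/News-Web-Scraper | twitter.py | remove_dig
-- ===== SOURCE A (Python) =====
-- def remove_dig(text):
--   tmp = ''
--   i = 0
--   while i < len(text):
--     #Removing all digits
--     #Removing all 's
--     if text[i] == "'" and i < len(text) - 1 and text[i+1] == "s":
--       i += 1
--     elif not text[i].isdigit():
--       tmp += text[i]
--     i += 1
--   return tmp
-- ===== SOURCE B (Python) =====
-- def remove_dig(text):
--     tmp = text.replace("'s", "")
--     return ''.join(c for c in tmp if not c.isdigit())
-- ===== Notes on version B (the rewrite author's own statement) =====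
-- stated objective: idiomatic
-- what changed: Replaced the single index-driven lookahead while-loop that grows a string by repeated concatenation with two passes: one str.replace pass for the apostrophe-s pairs followed by a join over an isdigit character filter.
import Mathlib
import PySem

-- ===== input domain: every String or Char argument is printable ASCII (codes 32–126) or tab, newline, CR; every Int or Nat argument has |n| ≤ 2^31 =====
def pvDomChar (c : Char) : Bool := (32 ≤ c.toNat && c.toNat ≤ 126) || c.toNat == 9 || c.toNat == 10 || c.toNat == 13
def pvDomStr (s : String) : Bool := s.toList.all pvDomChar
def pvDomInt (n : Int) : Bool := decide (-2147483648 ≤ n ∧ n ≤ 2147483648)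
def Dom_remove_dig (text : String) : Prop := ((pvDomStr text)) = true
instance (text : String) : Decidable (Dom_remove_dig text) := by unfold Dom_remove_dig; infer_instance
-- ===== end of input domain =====

-- B replaces A's index-driven lookahead while-loop by a str.replace("'s","") pass
-- followed by an isdigit character filter (idiomatic; return value proved equal on Dom).

-- ===== PORT A =====
-- A's while-loop over index i, transcribed as recursion over the remaining characters:
-- the "'s" lookahead (text[i] = '\'' ∧ i < len-1 ∧ text[i+1] = 's') skips two characters,
-- a digit is dropped, any other character is appended.
def removeDigGoA : List Char → List Char
  | [] => []
  | c :: rest =>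
    if c = '\'' ∧ rest.head? = some 's' then removeDigGoA rest.tail
    else if PySem.Chars.isdigit c then removeDigGoA rest
    else c :: removeDigGoA rest
termination_by l => l.length
decreasing_by
  all_goals simp [List.length_tail]
  all_goals omega

def remove_dig (text : String) : String := String.ofList (removeDigGoA text.toList)

-- ===== PORT B =====
def remove_dig_alt (text : String) : String :=
  let tmp := PySem.Str.replace text "'s" ""
  String.ofList (tmp.toList.filter (fun c => !PySem.Chars.isdigit c))

-- ===== PRECONDITION & SPEC =====
def Spec_remove_dig (text : String) (out : String) : Prop := out = remove_dig_alt text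
instance (text : String) (out : String) : Decidable (Spec_remove_dig text out) := by unfold Spec_remove_dig; infer_instance

-- ===== CLAIM (what is proved, stated in full; the proofs are below) =====
def Claim_equal_remove_dig : Prop := ∀ (text : String), Dom_remove_dig text → Spec_remove_dig text (remove_dig text)

-- ===== LEMMAS AND PROOFS =====

-- The result of replacing "'s" by "" : natural recursion on the character list.
def repPS : List Char → List Char
  | [] => []
  | c :: t => if List.isPrefixOf ['\'', 's'] (c :: t) then repPS t.tail else c :: repPS t
termination_by l => l.length
decreasing_by
  all_goals simp [List.length_tail]
  all_goals omega

theorem replace_go_eq (fuel : Nat) (l acc : List Char) (h : l.length ≤ fuel) :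
    PySem.Chars.replace.go ['\'', 's'] [] fuel l acc = acc.reverse ++ repPS l := by
  induction fuel generalizing l acc with
  | zero =>
    have : l = [] := List.eq_nil_of_length_eq_zero (Nat.le_zero.mp h)
    subst this
    simp [PySem.Chars.replace.go, repPS]
  | succ n ih =>
    cases l with
    | nil => simp [PySem.Chars.replace.go, repPS]
    | cons c t =>
      rw [PySem.Chars.replace.go]
      by_cases hp : List.isPrefixOf ['\'', 's'] (c :: t) = true
      · rw [if_pos hp]
        have hd : List.drop ((['\'', 's'] : List Char).length) (c :: t) = t.tail := by
          cases t <;> simp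
        rw [hd]
        have hlen : t.tail.length ≤ n := by
          have ht := @List.length_tail _ t
          simp at h; omega
        rw [ih _ _ hlen]
        rw [repPS, if_pos hp]
        simp
      · rw [if_neg hp]
        have hlen : t.length ≤ n := by simp at h; omega
        rw [ih _ _ hlen]
        rw [repPS, if_neg hp]
        simp

theorem prefix_cond (c : Char) (t : List Char) :
    List.isPrefixOf ['\'', 's'] (c :: t) = true ↔ (c = '\'' ∧ t.head? = some 's') := by
  cases t with
  | nil => simp [List.isPrefixOf]
  | cons d t' =>
    simp [List.isPrefixOf]
    constructor <;> (rintro ⟨h1, h2⟩; exact ⟨h1.symm, h2.symm⟩)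

theorem goA_eq_filter_rep (l : List Char) :
    removeDigGoA l = (repPS l).filter (fun c => !PySem.Chars.isdigit c) := by
  induction l using removeDigGoA.induct with
  | case1 => simp [removeDigGoA, repPS]
  | case2 c t hc ih =>
    rw [removeDigGoA, if_pos hc, ih, repPS, if_pos ((prefix_cond c t).mpr hc)]
  | case3 c t hc hd ih =>
    rw [removeDigGoA, if_neg hc, if_pos hd, ih, repPS,
      if_neg (fun h => hc ((prefix_cond c t).mp h))]
    simp [hd]
  | case4 c t hc hd ih =>
    rw [removeDigGoA, if_neg hc, if_neg hd, ih, repPS,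
      if_neg (fun h => hc ((prefix_cond c t).mp h))]
    simp [hd]

-- ===== VERDICT (by name: the statement is the Claim_ definition above) =====
theorem remove_dig_spec : Claim_equal_remove_dig := by
  intro text _
  show remove_dig text = remove_dig_alt text
  unfold remove_dig remove_dig_alt
  simp only [PySem.Str.replace, PySem.Chars.replace, String.toList_ofList]
  rw [if_neg (by simp)]
  rw [show ("'s".toList : List Char) = ['\'', 's'] from rfl,
    show ("".toList : List Char) = [] from rfl,
    replace_go_eq _ _ _ (Nat.le_refl _)]
  simp [goA_eq_filter_rep]
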